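-- pv_equiv track=rewrite | github.com/Hassan061/TextToPlot | main.py | add_line_after_count
-- ===== SOURCE A (Python) =====
-- def add_line_after_count(paragraph_list , WORDCOUNT = 20):
--     new_paragraph_list   = []
--
--     for sent in paragraph_list :
--         split_paragraph_paragraph_indices  = sent.split(" ")
--         word_count = 0
--         new_input_list = []
--         user_new_input = ''
--         for c in split_paragraph_paragraph_indices :
--             word_count += 1
--             new_input_list.append(c + " ")
--             if word_count == WORDCOUNT:
--                 new_input_list.append('\n')
--                 word_count = 0
--
--         new_sent = user_new_input.join(new_input_list)
--         new_paragraph_list.append(new_sent)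
--
--     return new_paragraph_list
-- ===== SOURCE B (Python) =====
-- def add_line_after_count(paragraph_list, WORDCOUNT=20):
--     out = []
--     for sent in paragraph_list:
--         words = sent.split(" ")
--         if WORDCOUNT <= 0:
--             # counter never reaches a non-positive WORDCOUNT: no newlines at all
--             out.append("".join(w + " " for w in words))
--             continue
--         parts = []
--         while words:
--             chunk, words = words[:WORDCOUNT], words[WORDCOUNT:]
--             parts.append("".join(w + " " for w in chunk))
--             if len(chunk) == WORDCOUNT:
--                 parts.append("\n")
--         out.append("".join(parts))
--     return out
-- ===== Notes on version B (the rewrite author's own statement) =====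
-- stated objective: alternative
-- what changed: Replaces A's per-word counter that is incremented and reset inside one fold with chunk-at-a-time slicing: B repeatedly splits off WORDCOUNT words, renders each chunk in one go and appends a newline exactly when the chunk is full (no newlines when WORDCOUNT <= 0).
import Mathlib
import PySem

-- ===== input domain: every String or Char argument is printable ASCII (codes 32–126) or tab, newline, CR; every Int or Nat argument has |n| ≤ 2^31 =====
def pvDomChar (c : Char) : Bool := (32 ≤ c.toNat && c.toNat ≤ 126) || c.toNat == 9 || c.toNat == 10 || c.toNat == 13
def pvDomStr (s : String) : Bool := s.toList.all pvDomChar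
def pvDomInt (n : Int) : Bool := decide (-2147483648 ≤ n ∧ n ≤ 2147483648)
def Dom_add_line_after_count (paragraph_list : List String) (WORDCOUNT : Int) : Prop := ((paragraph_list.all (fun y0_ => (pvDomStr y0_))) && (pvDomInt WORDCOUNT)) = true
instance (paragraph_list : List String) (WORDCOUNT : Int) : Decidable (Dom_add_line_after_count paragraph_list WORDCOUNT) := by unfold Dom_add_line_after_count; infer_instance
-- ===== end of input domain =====

-- B restructures A's counter-and-reset word loop into chunk-at-a-time slicing (alternative decomposition, same cost).
-- Strings are handled on the List Char side (PySem.Chars), as PYSEM.md prescribes; '' .join and + " " are exact there.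

-- ===== PORT A =====
-- the body of A's inner for-loop (word counter + parts list), named so the proofs can cite it
def pvStepA (WORDCOUNT : Int) (st : Int × List (List Char)) (c : List Char) : Int × List (List Char) :=
  let word_count := st.1 + 1
  let new_input_list := st.2 ++ [c ++ [' ']]
  if word_count = WORDCOUNT then ((0 : Int), new_input_list ++ [['\n']])
  else (word_count, new_input_list)

def add_line_after_count (paragraph_list : List String) (WORDCOUNT : Int) : List String :=
  paragraph_list.foldl (fun new_paragraph_list sent =>
    let words := PySem.Chars.splitOn sent.toList [' ']
    let st := words.foldl (pvStepA WORDCOUNT) ((0 : Int), [])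
    new_paragraph_list ++ [String.ofList (PySem.Chars.join [] st.2)]) []

-- ===== PORT B =====
-- the while loop of Source B: split off WORDCOUNT words, render the chunk, newline iff the chunk is full.
-- (Source B's slices words[:W], words[W:] with W ≥ 1 are exactly take/drop; the k = 0 branch is an
--  unreachable totality guard — B only calls this with k = WORDCOUNT.toNat ≥ 1.)
def pvChunks (k : Nat) (ws : List (List Char)) : List (List Char) :=
  if ws.isEmpty then []
  else if k = 0 then []
  else
    let chunk := ws.take k
    PySem.Chars.join [] (chunk.map (fun w => w ++ [' '])) ::
      (if chunk.length = k then [['\n']] else []) ++ pvChunks k (ws.drop k)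
termination_by ws.length
decreasing_by
  rename_i h1 h2
  simp [List.isEmpty_iff] at h1
  have : ws.length ≠ 0 := by simpa [List.length_eq_zero_iff] using h1
  simp only [List.length_drop]
  omega

def add_line_after_count_alt (paragraph_list : List String) (WORDCOUNT : Int) : List String :=
  paragraph_list.map (fun sent =>
    let words := PySem.Chars.splitOn sent.toList [' ']
    if WORDCOUNT ≤ 0 then
      String.ofList (PySem.Chars.join [] (words.map (fun w => w ++ [' '])))
    else
      String.ofList (PySem.Chars.join [] (pvChunks WORDCOUNT.toNat words)))

-- ===== PRECONDITION & SPEC =====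
def Spec_add_line_after_count (paragraph_list : List String) (WORDCOUNT : Int) (out : List String) : Prop := out = add_line_after_count_alt paragraph_list WORDCOUNT
instance (paragraph_list : List String) (WORDCOUNT : Int) (out : List String) : Decidable (Spec_add_line_after_count paragraph_list WORDCOUNT out) := by unfold Spec_add_line_after_count; infer_instance

-- ===== CLAIM (what is proved, stated in full; the proofs are below) =====
def Claim_equal_add_line_after_count : Prop := ∀ (paragraph_list : List String) (WORDCOUNT : Int), Dom_add_line_after_count paragraph_list WORDCOUNT → Spec_add_line_after_count paragraph_list WORDCOUNT (add_line_after_count paragraph_list WORDCOUNT)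

-- ===== LEMMAS AND PROOFS =====

-- join with empty separator is flatten
theorem pvJoin_nil_eq_flatten (ll : List (List Char)) :
    PySem.Chars.join [] ll = ll.flatten := by
  induction ll with
  | nil => simp [PySem.Chars.join_nil]
  | cons p rest ih =>
    cases rest with
    | nil => simp [PySem.Chars.join_singleton]
    | cons q r =>
      rw [PySem.Chars.join_cons_cons]
      simp only [List.flatten_cons]
      rw [ih]; simp

-- proof-side reference shape of one rendered sentence: r words left until the next newline
def pvSpecParts (k : Nat) : Nat → List (List Char) → List (List Char)
  | _, [] => []
  | r, w :: ws =>
      (w ++ [' ']) :: (if r = 1 then ['\n'] :: pvSpecParts k k ws else pvSpecParts k (r - 1) ws)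

-- A's inner fold, from any legal counter state, produces pvSpecParts
theorem pvFoldA_spec (W : Int) (hW : 1 ≤ W) (words : List (List Char)) :
    ∀ (wc : Int) (acc : List (List Char)), 0 ≤ wc → wc < W →
    (words.foldl (pvStepA W) (wc, acc)).2
      = acc ++ pvSpecParts W.toNat (W - wc).toNat words := by
  induction words with
  | nil => intro wc acc h0 h1; simp [pvSpecParts]
  | cons w ws ih =>
    intro wc acc h0 h1
    rw [List.foldl_cons]
    by_cases h : wc + 1 = W
    · have hstep : pvStepA W (wc, acc) w = ((0 : Int), acc ++ [w ++ [' ']] ++ [['\n']]) := by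
        simp [pvStepA, h]
      have hr : (W - wc).toNat = 1 := by omega
      rw [hstep, ih 0 _ le_rfl (by omega)]
      have h0' : (W - 0).toNat = W.toNat := by omega
      simp [pvSpecParts, hr]
    · have hstep : pvStepA W (wc, acc) w = (wc + 1, acc ++ [w ++ [' ']]) := by
        simp [pvStepA, h]
      have hr : (W - wc).toNat - 1 = (W - (wc + 1)).toNat := by omega
      have hr1 : (W - wc).toNat ≠ 1 := by omega
      rw [hstep, ih (wc + 1) _ (by omega) (by omega)]
      simp only [pvSpecParts, if_neg hr1, hr]
      simp

-- with a non-positive WORDCOUNT the counter (always ≥ 1 after an increment) never fires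
theorem pvFoldA_nonpos (W : Int) (hW : W ≤ 0) (words : List (List Char)) :
    ∀ (wc : Int) (acc : List (List Char)), 0 ≤ wc →
    (words.foldl (pvStepA W) (wc, acc)).2
      = acc ++ words.map (fun w => w ++ [' ']) := by
  induction words with
  | nil => intro wc acc h0; simp
  | cons w ws ih =>
    intro wc acc h0
    rw [List.foldl_cons]
    have hstep : pvStepA W (wc, acc) w = (wc + 1, acc ++ [w ++ [' ']]) := by
      have h : ¬ (wc + 1 = W) := by omega
      simp [pvStepA, h]
    rw [hstep, ih (wc + 1) _ (by omega)]
    simp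

-- pvSpecParts r k flattens to: first r words rendered, then (if a full block was reached) a newline and the rest
theorem pvSpecParts_flatten (k : Nat) (hk : 1 ≤ k) :
    ∀ (ws : List (List Char)) (r : Nat), 1 ≤ r → r ≤ k →
    (pvSpecParts k r ws).flatten
      = ((ws.take r).map (fun w => w ++ [' '])).flatten
        ++ (if (ws.take r).length = r then '\n' :: (pvSpecParts k k (ws.drop r)).flatten else []) := by
  intro ws
  induction ws with
  | nil =>
    intro r h1 h2
    have : ¬ ((0 : Nat) = r) := by omega
    simp [pvSpecParts, this]
  | cons w ws ih =>
    intro r h1 h2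
    by_cases hr : r = 1
    · subst hr
      simp [pvSpecParts]
    · have htake : (w :: ws).take r = w :: ws.take (r - 1) := by
        have : r = (r - 1) + 1 := by omega
        rw [this]; simp
      have hdrop : (w :: ws).drop r = ws.drop (r - 1) := by
        have : r = (r - 1) + 1 := by omega
        rw [this]; simp
      simp only [pvSpecParts, if_neg hr, List.flatten_cons]
      rw [ih (r - 1) (by omega) (by omega), htake, hdrop]
      simp only [List.map_cons, List.flatten_cons, List.length_cons, List.length_take]
      split_ifs with hA hB hB
      · simp
      · exfalso; omega
      · exfalso; omega
      · simp

-- chunk rendering flattens to the same characters as pvSpecParts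
theorem pvChunks_flatten (k : Nat) (hk : 1 ≤ k) (ws : List (List Char)) :
    (pvChunks k ws).flatten = (pvSpecParts k k ws).flatten := by
  induction hn : ws.length using Nat.strong_induction_on generalizing ws with
  | _ n ih =>
    cases ws with
    | nil => simp [pvChunks, pvSpecParts]
    | cons w rest =>
      rw [pvChunks]
      rw [if_neg (by simp), if_neg (by omega)]
      rw [pvSpecParts_flatten k hk (w :: rest) k hk le_rfl]
      simp only [List.flatten_cons, List.flatten_append, pvJoin_nil_eq_flatten]
      by_cases hc : ((w :: rest).take k).length = k
      · have hlt : ((w :: rest).drop k).length < n := by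
          subst hn; simp; omega
        rw [ih _ hlt _ rfl]
        simp [hc]
      · have hlen : (w :: rest).length < k := by
          rcases Nat.lt_or_ge ((w :: rest).length) k with hlt | hge
          · exact hlt
          · exact absurd (by simp only [List.length_take]; exact Nat.min_eq_left hge) hc
        have hdrop : (w :: rest).drop k = [] := by
          rw [List.drop_eq_nil_iff]; omega
        have hcond : ¬ (k ≤ rest.length + 1) := by
          simp only [List.length_cons] at hlen; omega
        rw [hdrop]
        simp [pvChunks, List.length_take, hcond]

-- one sentence: A's rendered string equals B's
theorem pvSentence_eq (W : Int) (words : List (List Char)) :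
    String.ofList (PySem.Chars.join [] ((words.foldl (pvStepA W) ((0 : Int), [])).2))
      = (if W ≤ 0 then String.ofList (PySem.Chars.join [] (words.map (fun w => w ++ [' '])))
         else String.ofList (PySem.Chars.join [] (pvChunks W.toNat words))) := by
  by_cases hW : W ≤ 0
  · rw [if_pos hW, pvFoldA_nonpos W hW words 0 [] le_rfl]
    simp
  · have hW1 : 1 ≤ W := by omega
    have hk : 1 ≤ W.toNat := by omega
    rw [if_neg hW, pvFoldA_spec W hW1 words 0 [] le_rfl (by omega)]
    rw [List.nil_append]
    have h0 : (W - 0).toNat = W.toNat := by omega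
    rw [h0, pvJoin_nil_eq_flatten, pvJoin_nil_eq_flatten, pvChunks_flatten W.toNat hk words]

-- ===== VERDICT (by name: the statement is the Claim_ definition above) =====
theorem add_line_after_count_spec : Claim_equal_add_line_after_count := by
  intro pl W _
  show add_line_after_count pl W = add_line_after_count_alt pl W
  unfold add_line_after_count add_line_after_count_alt
  rw [PySem.List.foldl_append_singleton_eq_map]
  rw [List.nil_append]
  apply List.map_congr_left
  intro sent _
  exact pvSentence_eq W (PySem.Chars.splitOn sent.toList [' '])
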